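-- pv_equiv track=rewrite | github.com/AduAkorful/SmartTestHub | Containers/non-evm-starknet/scripts/generate_starknet_tests.py | generate_function_args
-- ===== SOURCE A (Python) =====
-- def generate_function_args(args_string: str) -> str:
--     """Generate argument preparation code"""
--     if not args_string.strip():
--         return "# No arguments needed"
--
--     args = []
--     for arg in args_string.split(','):
--         arg = arg.strip()
--         if ':' in arg:
--             name, typ = arg.split(':', 1)
--             name = name.strip()
--             typ = typ.strip()
--
--             if 'felt' in typ.lower() or 'u256' in typ.lower() or 'u128' in typ.lower():
--                 args.append(f"{name} = 123")
--             elif 'address' in typ.lower() or 'contractaddress' in typ.lower():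
--                 args.append(f"{name} = owner_address")
--             elif 'bool' in typ.lower():
--                 args.append(f"{name} = True")
--             else:
--                 args.append(f"{name} = 0")
--
--     return "\n            ".join([f"# {arg}" for arg in args])
-- ===== SOURCE B (Python) =====
-- _KEYWORDS = ('felt', 'u256', 'u128', 'address', 'contractaddress', 'bool')
--
-- _SEP = "\n            "
--
--
-- def _value(t):
--     """Collect all keywords occurring in the type, then decide by group."""
--     hits = [k for k in _KEYWORDS if k in t]
--     if any(k in hits for k in ('felt', 'u256', 'u128')):
--         return '123'
--     if 'address' in hits or 'contractaddress' in hits: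
--         return 'owner_address'
--     return 'True' if 'bool' in hits else '0'
--
--
-- def _parse(parts):
--     """Recursively turn comma-split pieces into (name, lowered type) pairs."""
--     if not parts:
--         return []
--     rest = _parse(parts[1:])
--     head = parts[0].strip()
--     if ':' not in head:
--         return rest
--     name, typ = head.split(':', 1)
--     return [(name.strip(), typ.strip().lower())] + rest
--
--
-- def _render(pairs):
--     """Recursively build the commented lines joined by the indent separator."""
--     if not pairs:
--         return ""
--     (name, typ), rest = pairs[0], pairs[1:]
--     line = f"# {name} = {_value(typ)}"
--     tail = _render(rest)
--     return line + _SEP + tail if tail else line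
--
--
-- def generate_function_args(args_string: str) -> str:
--     """Generate argument preparation code (staged recursive version)."""
--     if not args_string.strip():
--         return "# No arguments needed"
--     return _render(_parse(args_string.split(',')))
-- ===== Notes on version B (the rewrite author's own statement) =====
-- stated objective: alternative
-- what changed: A's single imperative loop with an if/elif keyword cascade is replaced by staged recursion: a recursive parser builds (name, lowered type) pairs, classification first collects the list of ALL keywords occurring in the type and then decides by group membership, and a recursive renderer concatenates the commented lines with the separator directly instead of list-append plus a second map pass and join.
import Mathlib
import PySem

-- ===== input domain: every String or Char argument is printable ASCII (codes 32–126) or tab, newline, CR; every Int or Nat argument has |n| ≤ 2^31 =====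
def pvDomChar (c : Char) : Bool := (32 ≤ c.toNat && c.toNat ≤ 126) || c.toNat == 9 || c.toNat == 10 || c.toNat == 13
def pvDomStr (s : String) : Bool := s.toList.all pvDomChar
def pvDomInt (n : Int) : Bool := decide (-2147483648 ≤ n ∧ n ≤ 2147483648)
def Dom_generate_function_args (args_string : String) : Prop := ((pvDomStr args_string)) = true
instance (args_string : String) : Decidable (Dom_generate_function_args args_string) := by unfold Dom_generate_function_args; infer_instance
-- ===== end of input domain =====

-- B replaces A's imperative loop + if/elif cascade + map/join by staged recursion: a recursive
-- parser into (name, type) pairs, a classifier over the list of all matched keywords, and a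
-- recursive renderer that concatenates the joined string directly (objective: alternative).

-- ===== PORT A =====
-- Port of A: one foldl over the comma pieces; per piece an if/elif substring cascade appends a
-- line; a second map adds the '# ' prefix before joining.
def generate_function_args (args_string : String) : String :=
  if PySem.Chars.strip args_string.toList = [] then "# No arguments needed"
  else
    let args := (PySem.Chars.splitOn args_string.toList [',']).foldl
      (fun (acc : List (List Char)) piece =>
        let arg := PySem.Chars.strip piece
        if PySem.Chars.isIn [':'] arg then
          match PySem.Chars.splitOnMax arg [':'] 1 with
          | nameRaw :: typRaw :: _ =>
            let name := PySem.Chars.strip nameRaw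
            let tl := PySem.Chars.lower (PySem.Chars.strip typRaw)
            if PySem.Chars.isIn "felt".toList tl || PySem.Chars.isIn "u256".toList tl
                || PySem.Chars.isIn "u128".toList tl then
              acc ++ [name ++ " = 123".toList]
            else if PySem.Chars.isIn "address".toList tl
                || PySem.Chars.isIn "contractaddress".toList tl then
              acc ++ [name ++ " = owner_address".toList]
            else if PySem.Chars.isIn "bool".toList tl then
              acc ++ [name ++ " = True".toList]
            else
              acc ++ [name ++ " = 0".toList]
          | _ => acc
        else acc) []
    String.ofList (PySem.Chars.join "\n            ".toList (args.map (fun a => "# ".toList ++ a)))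

-- ===== PORT B =====
-- Source B's _KEYWORDS tuple.
def pvKeywords : List (List Char) :=
  ["felt".toList, "u256".toList, "u128".toList, "address".toList, "contractaddress".toList, "bool".toList]

-- Source B's _value: collect the list of ALL keywords occurring in the type, then decide by group.
def pvValue (t : List Char) : List Char :=
  let hits := pvKeywords.filter (fun k => PySem.Chars.isIn k t)
  if (["felt".toList, "u256".toList, "u128".toList]).any (fun k => hits.contains k) then
    "123".toList
  else if hits.contains "address".toList || hits.contains "contractaddress".toList then
    "owner_address".toList
  else if hits.contains "bool".toList then "True".toList
  else "0".toList

-- Source B's _parse: recursion over the comma pieces producing (name, lowered type) pairs.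
def pvParse : List (List Char) → List (List Char × List Char)
  | [] => []
  | p :: ps =>
    let rest := pvParse ps
    let head := PySem.Chars.strip p
    if PySem.Chars.isIn [':'] head then
      match PySem.Chars.splitOnMax head [':'] 1 with
      | nameRaw :: more =>
        match more with
        | typRaw :: _ =>
          [(PySem.Chars.strip nameRaw, PySem.Chars.lower (PySem.Chars.strip typRaw))] ++ rest
        | [] => rest
      | [] => rest
    else rest

-- Source B's _render: recursion building the separator-joined string directly.
def pvRender : List (List Char × List Char) → List Char
  | [] => []
  | (name, typ) :: rest =>
    let line := "# ".toList ++ name ++ " = ".toList ++ pvValue typ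
    let tail := pvRender rest
    if tail = [] then line else line ++ "\n            ".toList ++ tail

def generate_function_args_alt (args_string : String) : String :=
  if PySem.Chars.strip args_string.toList = [] then "# No arguments needed"
  else String.ofList (pvRender (pvParse (PySem.Chars.splitOn args_string.toList [','])))

-- ===== PRECONDITION & SPEC =====
def Spec_generate_function_args (args_string : String) (out : String) : Prop := out = generate_function_args_alt args_string
instance (args_string : String) (out : String) : Decidable (Spec_generate_function_args args_string out) := by unfold Spec_generate_function_args; infer_instance

-- ===== CLAIM (what is proved, stated in full; the proofs are below) =====
def Claim_equal_generate_function_args : Prop := ∀ (args_string : String), Dom_generate_function_args args_string → Spec_generate_function_args args_string (generate_function_args args_string)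

-- ===== LEMMAS AND PROOFS =====

-- A's per-piece lines, written as a structural recursion (proof-side restatement of A's fold).
def pvLinesA : List (List Char) → List (List Char)
  | [] => []
  | p :: ps =>
    (let arg := PySem.Chars.strip p
     if PySem.Chars.isIn [':'] arg then
       match PySem.Chars.splitOnMax arg [':'] 1 with
       | nameRaw :: typRaw :: _ =>
         let name := PySem.Chars.strip nameRaw
         let tl := PySem.Chars.lower (PySem.Chars.strip typRaw)
         if PySem.Chars.isIn "felt".toList tl || PySem.Chars.isIn "u256".toList tl
             || PySem.Chars.isIn "u128".toList tl then
           [name ++ " = 123".toList]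
         else if PySem.Chars.isIn "address".toList tl
             || PySem.Chars.isIn "contractaddress".toList tl then
           [name ++ " = owner_address".toList]
         else if PySem.Chars.isIn "bool".toList tl then
           [name ++ " = True".toList]
         else
           [name ++ " = 0".toList]
       | _ => []
     else []) ++ pvLinesA ps

theorem pvFoldl_eq_linesA (ps : List (List Char)) : ∀ (acc : List (List Char)),
    ps.foldl
      (fun (acc : List (List Char)) piece =>
        let arg := PySem.Chars.strip piece
        if PySem.Chars.isIn [':'] arg then
          match PySem.Chars.splitOnMax arg [':'] 1 with
          | nameRaw :: typRaw :: _ =>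
            let name := PySem.Chars.strip nameRaw
            let tl := PySem.Chars.lower (PySem.Chars.strip typRaw)
            if PySem.Chars.isIn "felt".toList tl || PySem.Chars.isIn "u256".toList tl
                || PySem.Chars.isIn "u128".toList tl then
              acc ++ [name ++ " = 123".toList]
            else if PySem.Chars.isIn "address".toList tl
                || PySem.Chars.isIn "contractaddress".toList tl then
              acc ++ [name ++ " = owner_address".toList]
            else if PySem.Chars.isIn "bool".toList tl then
              acc ++ [name ++ " = True".toList]
            else
              acc ++ [name ++ " = 0".toList]
          | _ => acc
        else acc) acc = acc ++ pvLinesA ps := by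
  induction ps with
  | nil => intro acc; simp [pvLinesA]
  | cons p ps ih =>
    intro acc
    rw [List.foldl_cons, ih]
    simp only [pvLinesA]
    rw [← List.append_assoc]
    congr 1
    dsimp only
    by_cases hc : PySem.Chars.isIn [':'] (PySem.Chars.strip p) = true
    · simp only [hc, if_pos]
      cases hsp : PySem.Chars.splitOnMax (PySem.Chars.strip p) [':'] 1 with
      | nil => simp
      | cons nameRaw rest =>
        cases rest with
        | nil => simp
        | cons typRaw rest2 =>
          dsimp only
          split_ifs <;> rfl
    · simp [hc]

theorem pvLit123 : (" = 123".toList : List Char) = " = ".toList ++ "123".toList := by decide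
theorem pvLitOwner : (" = owner_address".toList : List Char) = " = ".toList ++ "owner_address".toList := by decide
theorem pvLitTrue : (" = True".toList : List Char) = " = ".toList ++ "True".toList := by decide
theorem pvLitZero : (" = 0".toList : List Char) = " = ".toList ++ "0".toList := by decide

-- B's group classification over the matched-keyword list agrees with A's if/elif cascade.
theorem pvValue_eq (tl : List Char) :
    pvValue tl =
      (if PySem.Chars.isIn "felt".toList tl || PySem.Chars.isIn "u256".toList tl
          || PySem.Chars.isIn "u128".toList tl then "123".toList
       else if PySem.Chars.isIn "address".toList tl
          || PySem.Chars.isIn "contractaddress".toList tl then "owner_address".toList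
       else if PySem.Chars.isIn "bool".toList tl then "True".toList
       else "0".toList) := by
  cases h1 : PySem.Chars.isIn "felt".toList tl <;>
  cases h2 : PySem.Chars.isIn "u256".toList tl <;>
  cases h3 : PySem.Chars.isIn "u128".toList tl <;>
  cases h4 : PySem.Chars.isIn "address".toList tl <;>
  cases h5 : PySem.Chars.isIn "contractaddress".toList tl <;>
  cases h6 : PySem.Chars.isIn "bool".toList tl <;>
    simp_all [pvValue, pvKeywords, List.filter]

-- parsing then formatting produces exactly A's lines with the '# ' prefix.
theorem pvParse_map_eq (ps : List (List Char)) :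
    (pvParse ps).map (fun nt => "# ".toList ++ nt.1 ++ " = ".toList ++ pvValue nt.2)
      = (pvLinesA ps).map (fun a => "# ".toList ++ a) := by
  induction ps with
  | nil => simp [pvParse, pvLinesA]
  | cons p ps ih =>
    simp only [pvParse, pvLinesA]
    by_cases hc : PySem.Chars.isIn [':'] (PySem.Chars.strip p) = true
    · simp only [hc, if_pos]
      cases hsp : PySem.Chars.splitOnMax (PySem.Chars.strip p) [':'] 1 with
      | nil => simpa using ih
      | cons nameRaw rest =>
        cases rest with
        | nil => simpa using ih
        | cons typRaw rest2 =>
          dsimp only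
          rw [List.map_append, List.map_append, ih]
          congr 1
          simp only [List.map_cons, List.map_nil]
          rw [pvValue_eq]
          split_ifs <;> simp [pvLit123, pvLitOwner, pvLitTrue, pvLitZero]
    · simp only [hc, if_neg, Bool.not_eq_true]
      simpa using ih

theorem pvRender_cons (n t : List Char) (rest : List (List Char × List Char)) :
    pvRender ((n, t) :: rest)
      = (if pvRender rest = [] then "# ".toList ++ n ++ " = ".toList ++ pvValue t
         else ("# ".toList ++ n ++ " = ".toList ++ pvValue t) ++ "\n            ".toList
                ++ pvRender rest) := rfl

theorem pvRender_cons_ne (n t : List Char) (rest : List (List Char × List Char)) :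
    pvRender ((n, t) :: rest) ≠ [] := by
  rw [pvRender_cons]
  split_ifs <;> simp

-- B's recursive renderer computes the separator-join of the formatted lines.
theorem pvRender_eq_join (pairs : List (List Char × List Char)) :
    pvRender pairs
      = PySem.Chars.join "\n            ".toList
          (pairs.map (fun nt => "# ".toList ++ nt.1 ++ " = ".toList ++ pvValue nt.2)) := by
  induction pairs with
  | nil => simp [pvRender, PySem.Chars.join, List.intercalate]
  | cons p rest ih =>
    obtain ⟨n, t⟩ := p
    cases rest with
    | nil => simp [pvRender, PySem.Chars.join, List.intercalate]
    | cons q rest2 =>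
      obtain ⟨qn, qt⟩ := q
      have hne := pvRender_cons_ne qn qt rest2
      rw [pvRender_cons, if_neg hne, ih]
      simp [PySem.Chars.join, List.intercalate]

-- ===== VERDICT (by name: the statement is the Claim_ definition above) =====
theorem generate_function_args_spec : Claim_equal_generate_function_args := by
  intro s _
  unfold Spec_generate_function_args generate_function_args generate_function_args_alt
  by_cases h : PySem.Chars.strip s.toList = []
  · simp [h]
  · simp only [h, if_neg, not_false_iff]
    rw [pvFoldl_eq_linesA (PySem.Chars.splitOn s.toList [',']) []]
    rw [pvRender_eq_join, pvParse_map_eq]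
    simp
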